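-- pv_equiv track=rewrite | github.com/arilotter/Pydeck | Tests/DeckParser.py | sort_dupes
-- ===== SOURCE A (Python) =====
-- def sort_dupes(cardList):
--     counts = {}
--     for i in cardList:
--         try:
--             counts[i] += 1
--         except KeyError:
--             counts[i] = 1
--     return ["%sx %s" % (v, i)
--             for i, v in counts.items()]
-- ===== SOURCE B (Python) =====
-- def sort_dupes(cardList):
--     out = []
--     rest = cardList
--     while rest:
--         head = rest[0]
--         nxt = [x for x in rest[1:] if x != head]
--         out.append("%sx %s" % (len(rest) - len(nxt), head))
--         rest = nxt
--     return out
-- ===== Notes on version B (the rewrite author's own statement) =====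
-- stated objective: alternative
-- what changed: Replaces the single-pass dict tally with an iterative partition: repeatedly take the first remaining element, filter all its occurrences out of the remainder, emit its count as the length difference, and loop on what is left — no dictionary or counter at all.
import Mathlib
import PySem

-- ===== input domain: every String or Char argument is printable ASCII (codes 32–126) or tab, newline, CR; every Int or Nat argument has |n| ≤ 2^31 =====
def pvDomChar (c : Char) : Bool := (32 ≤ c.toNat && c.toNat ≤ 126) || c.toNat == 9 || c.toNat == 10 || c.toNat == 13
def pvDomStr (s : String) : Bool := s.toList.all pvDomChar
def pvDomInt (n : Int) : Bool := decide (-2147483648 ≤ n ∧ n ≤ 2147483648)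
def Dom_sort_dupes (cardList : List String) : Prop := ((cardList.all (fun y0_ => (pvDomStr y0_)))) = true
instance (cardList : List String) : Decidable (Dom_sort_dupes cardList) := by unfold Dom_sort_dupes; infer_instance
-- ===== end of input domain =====

-- ===== PORT A =====
-- B replaces A's single-pass dict tally with an iterative partition (head's count by
-- length difference after filtering, loop on the remainder); same output, no dict.
def sort_dupes (cardList : List String) : List String :=
  let counts : PySem.Dict String Int :=
    cardList.foldl (fun d i => d.insert i (d.getD i 0 + 1)) PySem.Dict.empty
  counts.items.map (fun p => PySem.Int.toStr p.2 ++ "x " ++ p.1)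

-- ===== PORT B =====
-- the while loop of Source B: state (out, rest)
def sortDupesLoop (out : List String) : List String → List String
  | [] => out
  | h :: t =>
    let nxt := t.filter (fun x => !(x == h))
    sortDupesLoop
      (out ++ [PySem.Int.toStr (((h :: t).length - nxt.length : Nat) : Int) ++ "x " ++ h])
      nxt
termination_by rest => rest.length
decreasing_by
  simp only [List.length_unattach]
  exact Nat.lt_succ_of_le (le_trans (List.length_filter_le _ _) (by simp))

def sort_dupes_alt (cardList : List String) : List String :=
  sortDupesLoop [] cardList

-- ===== PRECONDITION & SPEC =====
def Spec_sort_dupes (cardList : List String) (out : List String) : Prop := out = sort_dupes_alt cardList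
instance (cardList : List String) (out : List String) : Decidable (Spec_sort_dupes cardList out) := by unfold Spec_sort_dupes; infer_instance

-- ===== CLAIM (what is proved, stated in full; the proofs are below) =====
def Claim_equal_sort_dupes : Prop := ∀ (cardList : List String), Dom_sort_dupes cardList → Spec_sort_dupes cardList (sort_dupes cardList)

-- ===== LEMMAS AND PROOFS =====

-- Adding elements already excluded by a filter on `h` never revisits `h`:
-- folding Set.add over a list that avoids `a` commutes with a leading `a`.
theorem foldl_add_cons_of_not_mem {α : Type} [BEq α] [LawfulBEq α]
    (t : List α) (a : α) :
    ∀ s : List α, (∀ x ∈ t, x ≠ a) →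
      t.foldl PySem.Set.add (a :: s) = a :: t.foldl PySem.Set.add s := by
  induction t with
  | nil => intro s _; rfl
  | cons x t ih =>
    intro s hx
    have hxa : x ≠ a := hx x (by simp)
    have hrec := ih (PySem.Set.add s x) (fun y hy => hx y (by simp [hy]))
    simp only [List.foldl_cons]
    rw [← hrec]
    congr 1
    simp only [PySem.Set.add, PySem.Set.contains, List.contains_cons]
    have hxaf : (x == a) = false := by simp [hxa]
    simp only [hxaf, Bool.false_or]
    split <;> rfl

-- Folding Set.add ignores elements already present in the accumulator.
theorem foldl_add_filter_mem {α : Type} [BEq α] [LawfulBEq α]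
    (t : List α) (a : α) :
    ∀ s : List α, a ∈ s →
      t.foldl PySem.Set.add s = (t.filter (fun x => !(x == a))).foldl PySem.Set.add s := by
  induction t with
  | nil => intro s _; rfl
  | cons x t ih =>
    intro s ha
    by_cases hxa : x = a
    · subst hxa
      have : PySem.Set.add s x = s := by
        simp [PySem.Set.add, PySem.Set.contains, ha]
      simp [this, ih s ha]
    · have hmem : a ∈ PySem.Set.add s x := by
        simp [PySem.Set.add]
        split <;> simp [ha]
      simp [hxa, ih _ hmem]

-- Python's ordered dedup peels off the first element and all its later occurrences.
theorem ofList_cons_filter {α : Type} [BEq α] [LawfulBEq α] (h : α) (t : List α) :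
    PySem.Set.ofList (h :: t)
      = h :: PySem.Set.ofList (t.filter (fun x => !(x == h))) := by
  have h1 : PySem.Set.ofList (h :: t) = t.foldl PySem.Set.add [h] := by
    simp [PySem.Set.ofList_eq_foldl, PySem.Set.add, PySem.Set.contains]
  rw [h1, foldl_add_filter_mem t h [h] (by simp)]
  rw [foldl_add_cons_of_not_mem _ h []
    (by intro x hx; simpa using (List.of_mem_filter hx))]
  simp [PySem.Set.ofList_eq_foldl]

-- B's recursion computes exactly "count of k in xs" for each k of the ordered dedup.
-- B's loop computes exactly "count of k in rest" for each k of the ordered dedup of rest,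
-- appended to the accumulator.
theorem loop_characterization : ∀ (n : Nat) (xs out : List String), xs.length ≤ n →
    sortDupesLoop out xs
      = out ++ (PySem.Set.ofList xs).map
          (fun k => PySem.Int.toStr ((xs.count k : Nat) : Int) ++ "x " ++ k) := by
  intro n
  induction n with
  | zero =>
    intro xs out hxs
    have : xs = [] := List.eq_nil_of_length_eq_zero (Nat.le_zero.mp hxs)
    subst this
    rw [sortDupesLoop.eq_1]; simp
  | succ n ih =>
    intro xs out hxs
    match xs with
    | [] => rw [sortDupesLoop.eq_1]; simp
    | h :: t =>
      rw [sortDupesLoop.eq_2, ofList_cons_filter, List.map_cons]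
      have hrest : (t.filter (fun x => !(x == h))).length ≤ n := by
        have := List.length_filter_le (fun x => !(x == h)) t
        simp at hxs; omega
      rw [ih _ _ hrest]
      have hcnt : (h :: t).length - (t.filter (fun x => !(x == h))).length
          = (h :: t).count h := by
        have h1 : t.length = t.countP (fun x => x == h) + t.countP (fun x => !(x == h)) := by
          have := List.length_eq_countP_add_countP (p := fun x => x == h) (l := t)
          simpa using this
        have h2 : (t.filter (fun x => !(x == h))).length = t.countP (fun x => !(x == h)) := by
          simp [List.countP_eq_length_filter]
        have h3 : t.count h = t.countP (fun x => x == h) := rfl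
        simp only [List.length_cons, List.count_cons_self]
        omega
      rw [hcnt, List.append_assoc, List.singleton_append]
      congr 2
      apply List.map_congr_left
      intro k hk
      have hk' : k ∈ t.filter (fun x => !(x == h)) := by
        simpa [PySem.Set.mem_ofList] using hk
      have hkneq : (k == h) = false := by
        have := List.of_mem_filter hk'
        simpa using this
      have hcount : (t.filter (fun x => !(x == h))).count k = (h :: t).count k := by
        rw [List.count_filter (by simp [hkneq])]
        have hne : ¬ h = k := fun e => by simp [e] at hkneq
        simp [hne]
      rw [hcount]

-- ===== VERDICT (by name: the statement is the Claim_ definition above) =====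
theorem sort_dupes_spec : Claim_equal_sort_dupes := by
  intro cardList _
  unfold Spec_sort_dupes sort_dupes sort_dupes_alt
  rw [loop_characterization cardList.length cardList [] (Nat.le_refl _), List.nil_append]
  simp [PySem.Dict.foldl_insert_getD_add_one_eq_counter, PySem.Dict.items_counter,
        List.map_map, Function.comp]
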